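-- pv_equiv track=rewrite | github.com/Strong-AI-Lab/AbductionRules | analysis.py | printable_table
-- ===== SOURCE A (Python) =====
-- def printable_table(rows):
--     rows = [[str(item) for item in row] for row in rows]
--     lengths = {}
--     for row in rows:
--         for i, item in enumerate(row):
--             if i in lengths:
--                 lengths[i] = max(lengths[i], len(item))
--             else:
--                 lengths[i] = len(item)
--     new_rows = [[item.rjust(lengths[i]) for i, item in enumerate(row)] for row in rows]
--     printable = "\n".join([" ".join(row) for row in new_rows])
--     return printable
-- ===== SOURCE B (Python) =====
-- def printable_table(rows):
--     rows = [[str(item) for item in row] for row in rows]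
--
--     def rec(rs):
--         # recurse column by column: render the first column, then the rest
--         if all(not r for r in rs):
--             return ['' for _ in rs]
--         w = max(len(r[0]) for r in rs if r)
--         rest = rec([r[1:] for r in rs])
--         return [('' if not r else r[0].rjust(w) + (' ' + t if r[1:] else ''))
--                 for r, t in zip(rs, rest)]
--
--     return '\n'.join(rec(rows))
-- ===== Notes on version B (the rewrite author's own statement) =====
-- stated objective: alternative
-- what changed: Replaces A's two row-major sweeps (a dict of per-column maxima built over enumerated cells, then a lookup-driven rebuild) with a recursion on columns: peel the first column off every row, pad it to that column's width, and prepend it to the recursively rendered remainder, so no widths table exists at all.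
import Mathlib
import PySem

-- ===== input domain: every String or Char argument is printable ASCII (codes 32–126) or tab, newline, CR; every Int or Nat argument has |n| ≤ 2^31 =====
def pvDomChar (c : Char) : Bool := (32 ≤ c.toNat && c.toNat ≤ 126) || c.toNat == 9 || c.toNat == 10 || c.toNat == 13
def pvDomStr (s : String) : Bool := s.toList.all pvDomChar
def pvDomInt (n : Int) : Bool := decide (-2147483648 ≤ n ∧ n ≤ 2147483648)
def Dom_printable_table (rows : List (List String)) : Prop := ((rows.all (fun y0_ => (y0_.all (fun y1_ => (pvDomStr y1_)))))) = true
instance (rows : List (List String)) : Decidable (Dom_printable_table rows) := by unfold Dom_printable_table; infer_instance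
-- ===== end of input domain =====

-- B renders the table by recursion on columns (peel the first column, pad it, prepend it to
-- the rendered remainder) instead of A's widths-dict accumulation; objective: alternative.

-- shared primitive: str.rjust(w) with the default space fill (exact; w ≤ len returns s unchanged)
def pvRjust (s : String) (w : Int) : String :=
  String.ofList (List.replicate (w - PySem.Str.len s).toNat ' ' ++ s.toList)

-- ===== PORT A =====
-- 'lengths[i]' in A can never raise (every i of the second sweep was inserted by the first),
-- so the lookup is ported as getD with an arbitrary default 0.
def printable_table (rows : List (List String)) : String :=
  let rows := rows.map (fun row => row.map (fun item => item))  -- str(item): identity on str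
  let lengths : PySem.Dict Int Int := rows.foldl (fun d row =>
    (PySem.List.enumerate row).foldl (fun d p =>
      match d.get? p.1 with
      | some v => d.insert p.1 (max v (PySem.Str.len p.2))
      | none   => d.insert p.1 (PySem.Str.len p.2)) d) PySem.Dict.empty
  let new_rows := rows.map (fun row =>
    (PySem.List.enumerate row).map (fun p => pvRjust p.2 (lengths.getD p.1 0)))
  PySem.Str.join "\n" (new_rows.map (fun row => PySem.Str.join " " row))

-- ===== PORT B =====
-- termination facts for B's column recursion (cited by name in decreasing_by)
lemma pvSumDropLe (rows : List (List String)) :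
    ((rows.map (fun r => r.drop 1)).map List.length).sum ≤ (rows.map List.length).sum := by
  induction rows with
  | nil => simp
  | cons r t ih =>
      simp only [List.map_cons, List.sum_cons]
      have hd : (r.drop 1).length ≤ r.length := by simp
      exact Nat.add_le_add hd ih

lemma pvSumDropLt (rows : List (List String)) (h : ¬ rows.all (fun r => r.isEmpty) = true) :
    ((rows.map (fun r => r.drop 1)).map List.length).sum < (rows.map List.length).sum := by
  induction rows with
  | nil => simp at h
  | cons r t ih =>
      simp only [List.map_cons, List.sum_cons]
      by_cases hr : r.isEmpty
      · have ht : ¬ t.all (fun r => r.isEmpty) = true := by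
          intro hc; exact h (by simp [List.all_cons, hr, hc])
        have hd : (r.drop 1).length ≤ r.length := by simp
        have := ih ht; omega
      · have hlen : (r.drop 1).length < r.length := by
          cases r with
          | nil => simp at hr
          | cons a s => simp
        have := pvSumDropLe t; omega

-- B's recursion: 'rec(rs)' from Source B (r[1:] is List.drop 1, exact for that slice;
-- max over the nonempty-row heads is guaranteed a nonempty iterable here, ported as maxD 0)
def pvRecB (rows : List (List String)) : List String :=
  if h : rows.all (fun r => r.isEmpty) then rows.map (fun _ => "")
  else
    let w : Int := PySem.List.maxD
      ((rows.filter (fun r => !r.isEmpty)).map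
        (fun r => PySem.Str.len (PySem.List.pyGetD r 0 ""))) (fun x => x) 0
    let rest := pvRecB (rows.map (fun r => r.drop 1))
    (rows.zip rest).map (fun p =>
      match p.1 with
      | [] => ""
      | c :: cs => pvRjust c w ++ (if cs.isEmpty then "" else " " ++ p.2))
termination_by (rows.map List.length).sum
decreasing_by simpa using pvSumDropLt rows h

def printable_table_alt (rows : List (List String)) : String :=
  let rows := rows.map (fun row => row.map (fun item => item))  -- str(item): identity on str
  PySem.Str.join "\n" (pvRecB rows)

-- ===== PRECONDITION & SPEC =====
def Spec_printable_table (rows : List (List String)) (out : String) : Prop := out = printable_table_alt rows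
instance (rows : List (List String)) (out : String) : Decidable (Spec_printable_table rows out) := by unfold Spec_printable_table; infer_instance

-- ===== CLAIM (what is proved, stated in full; the proofs are below) =====
def Claim_equal_printable_table : Prop := ∀ (rows : List (List String)), Dom_printable_table rows → Spec_printable_table rows (printable_table rows)

-- ===== LEMMAS AND PROOFS =====

-- the column maximum both programs compute, as a single fold over the rows
def pvColMax (rows : List (List String)) (k : Nat) : Int :=
  rows.foldl (fun a r =>
    if ((k : Int)) < (r.length : Int) then max a (PySem.Str.len (PySem.List.pyGetD r (k : Int) "")) else a) 0

-- one row of the output, widths supplied as a function of the column index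
def pvRender (r : List String) (w : Nat → Int) : String :=
  match r with
  | [] => ""
  | c :: cs => pvRjust c (w 0) ++ (if cs.isEmpty then "" else " " ++ pvRender cs (fun j => w (j + 1)))

lemma pvLenNonneg (s : String) : 0 ≤ PySem.Str.len s := by
  rw [PySem.Str.len_eq]; exact_mod_cast Nat.zero_le _

-- A's dict update at one cell, read through getD
lemma pvStepD (d : PySem.Dict Int Int) (p : Int × String) (j : Int) :
    ((match d.get? p.1 with
      | some v => d.insert p.1 (max v (PySem.Str.len p.2))
      | none   => d.insert p.1 (PySem.Str.len p.2)) : PySem.Dict Int Int).getD j 0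
    = if j = p.1 then max (d.getD j 0) (PySem.Str.len p.2) else d.getD j 0 := by
  cases h : d.get? p.1 with
  | none =>
      simp only [PySem.Dict.getD_insert]
      split
      · next hj => subst hj
                   rw [PySem.Dict.getD_of_get?_eq_none d 0 h]
                   exact (max_eq_right (pvLenNonneg p.2)).symm
      · rfl
  | some v =>
      simp only [PySem.Dict.getD_insert]
      split
      · next hj => subst hj; rw [PySem.Dict.getD_of_get?_eq_some d 0 h]
      · rfl

-- a fold of A's dict update over any list of cells, read through getD
lemma pvFoldStepD (l : List (Int × String)) (d : PySem.Dict Int Int) (j : Int) :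
    (l.foldl (fun d p =>
      match d.get? p.1 with
      | some v => d.insert p.1 (max v (PySem.Str.len p.2))
      | none   => d.insert p.1 (PySem.Str.len p.2)) d).getD j 0
    = l.foldl (fun a p => if j = p.1 then max a (PySem.Str.len p.2) else a) (d.getD j 0) := by
  induction l generalizing d with
  | nil => rfl
  | cons p t ih => simp only [List.foldl_cons, ih, pvStepD]

-- A's whole dict-building loop, read through getD
lemma pvOuterD (rows : List (List String)) (d : PySem.Dict Int Int) (j : Int) :
    (rows.foldl (fun d row =>
      (PySem.List.enumerate row).foldl (fun d p =>
        match d.get? p.1 with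
        | some v => d.insert p.1 (max v (PySem.Str.len p.2))
        | none   => d.insert p.1 (PySem.Str.len p.2)) d) d).getD j 0
    = rows.foldl (fun a row =>
        (PySem.List.enumerate row).foldl
          (fun a p => if j = p.1 then max a (PySem.Str.len p.2) else a) a) (d.getD j 0) := by
  induction rows generalizing d with
  | nil => rfl
  | cons r t ih => simp only [List.foldl_cons, ih, pvFoldStepD]

-- the numeric fold over one enumerated row picks out position k (if present)
lemma pvEnumFold (row : List String) (s k : Nat) (a0 : Int) :
    (PySem.List.enumerate row (s : Int)).foldl
      (fun a p => if ((k : Int)) = p.1 then max a (PySem.Str.len p.2) else a) a0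
    = if s ≤ k ∧ k < s + row.length then max a0 (PySem.Str.len (row.getD (k - s) "")) else a0 := by
  induction row generalizing s a0 with
  | nil => simp [PySem.List.enumerate]
  | cons x t ih =>
      rw [PySem.List.enumerate_cons]
      have hcast : ((s : Int)) + 1 = ((s + 1 : Nat) : Int) := by push_cast; ring
      by_cases hks : k = s
      · subst hks
        simp only [List.foldl_cons, hcast, ih]
        have h1 : ¬ (k + 1 ≤ k ∧ k < k + 1 + t.length) := by omega
        have h2 : k ≤ k ∧ k < k + (t.length + 1) := by omega
        simp [h2]
      · have hne : ¬ ((k : Int)) = (s : Int) := by exact_mod_cast hks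
        simp only [List.foldl_cons, if_neg hne, hcast, ih]
        by_cases hin : s + 1 ≤ k ∧ k < s + 1 + t.length
        · have hin' : s ≤ k ∧ k < s + (x :: t).length := by simp only [List.length_cons]; omega
          have hget : t.getD (k - (s + 1)) "" = (x :: t).getD (k - s) "" := by
            have hk1 : k - s = (k - (s + 1)) + 1 := by omega
            rw [hk1]; rfl
          rw [if_pos hin, if_pos hin', hget]
        · have hin' : ¬ (s ≤ k ∧ k < s + (x :: t).length) := by simp only [List.length_cons]; omega
          rw [if_neg hin, if_neg hin']

-- A's width at column k is the column maximum
lemma pvAWidth (rows : List (List String)) (k : Nat) :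
    (rows.foldl (fun d row =>
      (PySem.List.enumerate row).foldl (fun d p =>
        match d.get? p.1 with
        | some v => d.insert p.1 (max v (PySem.Str.len p.2))
        | none   => d.insert p.1 (PySem.Str.len p.2)) d) PySem.Dict.empty).getD (k : Int) 0
    = pvColMax rows k := by
  rw [pvOuterD, PySem.Dict.getD_empty, pvColMax]
  apply PySem.List.foldl_congr_mem
  intro a row _
  have := pvEnumFold row 0 k a
  simp only [Nat.cast_zero] at this
  rw [this]
  by_cases hk : k < row.length
  · have h1 : 0 ≤ k ∧ k < 0 + row.length := by omega
    have h2 : ((k : Int)) < (row.length : Int) := by exact_mod_cast hk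
    rw [if_pos h1, if_pos h2, PySem.List.pyGetD_natCast]
    simp
  · have h1 : ¬ (0 ≤ k ∧ k < 0 + row.length) := by omega
    have h2 : ¬ ((k : Int)) < (row.length : Int) := by exact_mod_cast hk
    rw [if_neg h1, if_neg h2]

-- max(…, default=0) over a list of nonnegative ints is the running max from 0
lemma pvMaxDNonneg (xs : List Int) (h : ∀ x ∈ xs, 0 ≤ x) :
    PySem.List.maxD xs (fun x => x) 0 = xs.foldl max 0 := by
  cases xs with
  | nil => rfl
  | cons x t =>
      have hx : max 0 x = x := max_eq_right (h x (List.mem_cons_self))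
      simp [PySem.List.maxD, PySem.List.max?_id_cons, hx]

-- B's head-column width is the column-0 maximum
lemma pvBHeadW (rows : List (List String)) :
    PySem.List.maxD
      ((rows.filter (fun r => !r.isEmpty)).map
        (fun r => PySem.Str.len (PySem.List.pyGetD r 0 ""))) (fun x => x) 0
    = pvColMax rows 0 := by
  rw [pvMaxDNonneg _ (by intro x hx
                         simp only [List.mem_map] at hx
                         obtain ⟨r, _, hxe⟩ := hx
                         exact hxe ▸ pvLenNonneg _)]
  have hfil : rows.filter (fun r => !r.isEmpty)
      = rows.filter (fun r => decide (((0 : Nat) : Int) < (r.length : Int))) := by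
    apply List.filter_congr
    intro r _
    cases r <;> simp
  rw [hfil, pvColMax,
      PySem.List.foldl_ite_eq_foldl_filter
        (p := fun r => (((0 : Nat) : Int)) < ((r.length : Nat) : Int))
        (f := fun a r => max a (PySem.Str.len (PySem.List.pyGetD r ((0 : Nat) : Int) ""))),
      List.foldl_map]
  simp

-- dropping the first cell of every row shifts the column maxima by one
lemma pvColMaxDrop (rows : List (List String)) (k : Nat) :
    pvColMax (rows.map (fun r => r.drop 1)) k = pvColMax rows (k + 1) := by
  unfold pvColMax
  rw [List.foldl_map]
  apply PySem.List.foldl_congr_mem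
  intro a r _
  by_cases h : k + 1 < r.length
  · have h1 : ((k : Int)) < ((r.drop 1).length : Int) := by
      simp only [List.length_drop]; exact_mod_cast (by omega : k < r.length - 1)
    have h2 : (((k + 1 : Nat)) : Int) < (r.length : Int) := by exact_mod_cast h
    rw [if_pos h1, if_pos h2, PySem.List.pyGetD_natCast, PySem.List.pyGetD_natCast]
    simp [List.getD_eq_getElem?_getD]
  · have h1 : ¬ ((k : Int)) < ((r.drop 1).length : Int) := by
      simp only [List.length_drop]; exact_mod_cast (by omega : ¬ k < r.length - 1)
    have h2 : ¬ (((k + 1 : Nat)) : Int) < (r.length : Int) := by exact_mod_cast h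
    rw [if_neg h1, if_neg h2]

-- zipping a list with a map of itself is a single map
lemma pvZipMap {α β γ : Type} (l : List α) (g : α → β) (f : α × β → γ) :
    ((l.zip (l.map g)).map f) = l.map (fun x => f (x, g x)) := by
  induction l with
  | nil => rfl
  | cons x t ih => simp only [List.map_cons, List.zip_cons_cons, ih]

-- pvRender only looks at widths below the row length — but the stronger pointwise form suffices
lemma pvRenderCongr (r : List String) (w1 w2 : Nat → Int) (h : ∀ j, w1 j = w2 j) :
    pvRender r w1 = pvRender r w2 := by
  induction r generalizing w1 w2 with
  | nil => rfl
  | cons c cs ih => simp only [pvRender, h 0, ih (fun j => w1 (j + 1)) (fun j => w2 (j + 1)) (fun j => h (j + 1))]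

-- B's recursion renders every row with the column maxima of the whole table
lemma pvRecBAllEmpty (rows : List (List String)) (h : rows.all (fun r => r.isEmpty) = true) :
    pvRecB rows = rows.map (fun r => pvRender r (fun j => pvColMax rows j)) := by
  rw [pvRecB, dif_pos h]
  apply List.map_congr_left
  intro r hr
  have hre : r.isEmpty := by rw [List.all_eq_true] at h; exact h r hr
  cases r with
  | nil => rfl
  | cons a s => simp at hre

lemma pvRecBEqAux (n : Nat) : ∀ (rows : List (List String)), (rows.map List.length).sum ≤ n →
    pvRecB rows = rows.map (fun r => pvRender r (fun j => pvColMax rows j)) := by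
  induction n with
  | zero =>
      intro rows hle
      by_cases h : rows.all (fun r => r.isEmpty)
      · exact pvRecBAllEmpty rows h
      · exact absurd (pvSumDropLt rows h) (by omega)
  | succ n ih =>
      intro rows hle
      by_cases h : rows.all (fun r => r.isEmpty)
      · exact pvRecBAllEmpty rows h
      · rw [pvRecB, dif_neg h]
        have hts : ((rows.map (fun r => r.drop 1)).map List.length).sum ≤ n := by
          have := pvSumDropLt rows h; omega
        simp only [ih _ hts, List.map_map, pvZipMap, Function.comp_apply]
        apply List.map_congr_left
        intro r _
        cases r with
        | nil => rfl
        | cons c cs =>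
            simp only [pvRender]
            congr 1
            · rw [pvBHeadW]
            · by_cases hcs : cs.isEmpty
              · rw [if_pos hcs, if_pos hcs]
              · rw [if_neg hcs, if_neg hcs]
                congr 1
                show pvRender ((c :: cs).drop 1) _ = _
                rw [show (c :: cs).drop 1 = cs from rfl]
                exact pvRenderCongr cs _ _ (fun j => pvColMaxDrop rows j)

lemma pvRecBEq (rows : List (List String)) :
    pvRecB rows = rows.map (fun r => pvRender r (fun j => pvColMax rows j)) :=
  pvRecBEqAux (rows.map List.length).sum rows le_rfl

-- unfolding pvRender on a two-or-more-cell row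
lemma pvRenderCC (c d : String) (t : List String) (w : Nat → Int) :
    pvRender (c :: d :: t) w = pvRjust c (w 0) ++ (" " ++ pvRender (d :: t) (fun j => w (j + 1))) := rfl

-- joining one rjust-ed enumerated row equals pvRender with shifted widths
lemma pvJoinRender (r : List String) (s : Nat) (g : Int → Int) :
    PySem.Str.join " " ((PySem.List.enumerate r (s : Int)).map (fun p => pvRjust p.2 (g p.1)))
    = pvRender r (fun j => g (((s + j : Nat)) : Int)) := by
  induction r generalizing s with
  | nil => rfl
  | cons c cs ih =>
      rw [PySem.List.enumerate_cons]
      have hcast : ((s : Int)) + 1 = ((s + 1 : Nat) : Int) := by push_cast; ring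
      cases cs with
      | nil =>
          show PySem.Str.join " " [pvRjust c (g (s : Int))] = _
          have : PySem.Str.join " " [pvRjust c (g (s : Int))] = pvRjust c (g (s : Int)) := by
            apply String.toList_injective
            simp [PySem.Str.join, PySem.Chars.join_singleton]
          rw [this]
          simp [pvRender]
      | cons d t =>
          rw [PySem.List.enumerate_cons]
          simp only [List.map_cons]
          have hstep : PySem.Str.join " "
              (pvRjust c (g (s : Int)) :: pvRjust d (g ((s : Int) + 1)) ::
                (PySem.List.enumerate t ((s : Int) + 1 + 1)).map (fun p => pvRjust p.2 (g p.1)))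
              = pvRjust c (g (s : Int)) ++ (" " ++ PySem.Str.join " "
                (pvRjust d (g ((s : Int) + 1)) ::
                  (PySem.List.enumerate t ((s : Int) + 1 + 1)).map (fun p => pvRjust p.2 (g p.1)))) := by
            apply String.toList_injective
            simp [PySem.Str.join, PySem.Chars.join_cons_cons]
          rw [hstep]
          have hrec : PySem.Str.join " "
              (pvRjust d (g ((s : Int) + 1)) ::
                (PySem.List.enumerate t ((s : Int) + 1 + 1)).map (fun p => pvRjust p.2 (g p.1)))
              = pvRender (d :: t) (fun j => g (((s + 1 + j : Nat)) : Int)) := by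
            have := ih (s + 1)
            rw [PySem.List.enumerate_cons, ← hcast] at this
            simpa using this
          rw [hrec, pvRenderCC]
          congr 1
          exact congrArg (fun x => " " ++ x)
            (pvRenderCongr _ _ _ (fun j => congrArg g (by push_cast; ring)))

-- ===== VERDICT (by name: the statement is the Claim_ definition above) =====
theorem printable_table_spec : Claim_equal_printable_table := by
  intro rows _
  unfold Spec_printable_table printable_table printable_table_alt
  simp only [List.map_id', List.map_map]
  rw [pvRecBEq]
  congr 1
  apply List.map_congr_left
  intro row hrow
  have hj := pvJoinRender row 0
    (fun i => (rows.foldl (fun d row =>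
      (PySem.List.enumerate row).foldl (fun d p =>
        match d.get? p.1 with
        | some v => d.insert p.1 (max v (PySem.Str.len p.2))
        | none   => d.insert p.1 (PySem.Str.len p.2)) d) PySem.Dict.empty).getD i 0)
  simp only [Nat.cast_zero] at hj
  simp only [Function.comp_apply]
  exact hj.trans (pvRenderCongr row _ _ (fun j => by simpa using pvAWidth rows j))
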